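-- pv_equiv track=rewrite | github.com/rafaelXVA/aulasSenac | lista 1/exc67.py | gmail
-- ===== SOURCE A (Python) =====
-- def gmail(email):
--     arroba = False
--     pont = False
--     before = False
--     after = False
--
--     for i, char in enumerate(email):
--         if char == '@':
--             if arroba:
--                 return False
--             arroba = True
--             before = i > 0
--         if char == '.':
--             if arroba:
--                 pont = True
--             after = arroba and i < len(email) - 1
--
--     if arroba and pont and before and after:
--         return True
--     return False
-- ===== SOURCE B (Python) =====
-- def gmail(email):
--     if email.count('@') != 1:
--         return False
--     at = email.find('@')
--     dot = email.rfind('.')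
--     return 0 < at and at < dot and dot < len(email) - 1
-- ===== Notes on version B (the rewrite author's own statement) =====
-- stated objective: simpler
-- what changed: Replaces the single left-to-right scan maintaining four boolean flags with three independent built-in string scans (count, find, and rfind of the LAST dot) combined in one boolean expression.
import Mathlib
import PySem

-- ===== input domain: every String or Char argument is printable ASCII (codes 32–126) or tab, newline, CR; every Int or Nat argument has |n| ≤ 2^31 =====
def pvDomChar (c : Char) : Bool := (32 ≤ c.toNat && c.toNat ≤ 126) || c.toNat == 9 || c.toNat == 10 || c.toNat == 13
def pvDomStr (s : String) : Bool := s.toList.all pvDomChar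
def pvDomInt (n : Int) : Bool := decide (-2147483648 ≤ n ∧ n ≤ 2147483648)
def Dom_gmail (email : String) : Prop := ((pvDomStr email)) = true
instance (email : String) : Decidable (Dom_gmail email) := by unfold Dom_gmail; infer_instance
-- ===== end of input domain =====

-- B replaces A's one-pass scan with four boolean flags by independent built-in
-- string scans (count / find / rfind) combined in one boolean expression
-- (simpler; a timing run also measured it faster by a constant factor).

-- ===== PORT A =====
-- the for-loop of A: state (arroba, pont, before, after), i the current index, n = len(email)
def gmailLoop (n : Nat) : List Char → Nat → Bool → Bool → Bool → Bool → Bool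
  | [], _, arroba, pont, before, after => arroba && pont && before && after
  | c :: rest, i, arroba, pont, before, after =>
    if c = '@' then
      if arroba then false
      else
        -- arroba := True; before := i > 0; then the (here vacuous) '.' test, kept literally
        if c = '.' then
          gmailLoop n rest (i+1) true (if true then true else pont) (decide (0 < i))
            (true && decide ((i : Int) < (n : Int) - 1))
        else
          gmailLoop n rest (i+1) true pont (decide (0 < i)) after
    else
      if c = '.' then
        gmailLoop n rest (i+1) arroba (if arroba then true else pont) before
          (arroba && decide ((i : Int) < (n : Int) - 1))
      else
        gmailLoop n rest (i+1) arroba pont before after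

def gmail (email : String) : Bool :=
  gmailLoop email.toList.length email.toList 0 false false false false

-- ===== PORT B =====
def gmail_alt (email : String) : Bool :=
  if PySem.Str.count email "@" ≠ 1 then false
  else
    let at_ := PySem.Str.find email "@"
    let dot := PySem.Str.rfind email "."
    decide (0 < at_) && decide (at_ < dot) && decide (dot < (PySem.Str.len email : Int) - 1)

-- ===== PRECONDITION & SPEC =====
def Spec_gmail (email : String) (out : Bool) : Prop := out = gmail_alt email
instance (email : String) (out : Bool) : Decidable (Spec_gmail email out) := by unfold Spec_gmail; infer_instance

-- ===== CLAIM (what is proved, stated in full; the proofs are below) =====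
def Claim_equal_gmail : Prop := ∀ (email : String), Dom_gmail email → Spec_gmail email (gmail email)

-- ===== LEMMAS AND PROOFS =====

-- index of the LAST occurrence of c (none if absent)
def lastIdx? (c : Char) : List Char → Option Nat
  | [] => none
  | x :: t =>
    match lastIdx? c t with
    | some k => some (k + 1)
    | none => if x = c then some 0 else none

-- the final value of A's `after` flag over a suffix scanned with arroba = true
def afterVal (n : Nat) : List Char → Nat → Bool → Bool
  | [], _, af => af
  | c :: t, i, af => afterVal n t (i+1) (if c = '.' then decide ((i : Int) < (n : Int) - 1) else af)

theorem isPrefixOf_singleton (c : Char) (l : List Char) :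
    [c].isPrefixOf l = true ↔ l.head? = some c := by
  cases l with
  | nil => simp [List.isPrefixOf]
  | cons x t =>
    simp only [List.isPrefixOf, List.head?, Option.some.injEq, Bool.and_eq_true, beq_iff_eq]
    simp [eq_comm]

theorem countgo_char (c : Char) : ∀ (fuel : Nat) (l : List Char) (acc : Nat),
    l.length ≤ fuel → PySem.Chars.count.go [c] fuel l acc = acc + l.count c := by
  intro fuel
  induction fuel with
  | zero =>
    intro l acc h
    have : l = [] := List.eq_nil_of_length_eq_zero (Nat.le_zero.mp h)
    subst this
    rw [PySem.Chars.count.go.eq_def]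
    simp
  | succ f ih =>
    intro l acc h
    cases l with
    | nil =>
      rw [PySem.Chars.count.go.eq_def]
      simp
    | cons x t =>
      by_cases hx : x = c
      · subst hx
        have hp : [x].isPrefixOf (x :: t) = true := by simp [List.isPrefixOf]
        rw [PySem.Chars.count.go.eq_def]
        simp only [hp, if_true]
        rw [show List.drop [x].length (x :: t) = t from rfl]
        rw [ih t (acc+1) (by simpa using Nat.le_of_succ_le_succ (by simpa using h))]
        simp [List.count_cons]
        omega
      · have hp : [c].isPrefixOf (x :: t) = false := by
          simp [List.isPrefixOf]; exact fun h => absurd h.symm hx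
        rw [PySem.Chars.count.go.eq_def]
        simp only [hp, Bool.false_eq_true, if_false]
        rw [ih t acc (by simpa using Nat.le_of_succ_le_succ (by simpa using h))]
        simp [List.count_cons, hx]

theorem count_char (s : List Char) (c : Char) :
    PySem.Chars.count s [c] = s.count c := by
  simp only [PySem.Chars.count]
  simpa using countgo_char c s.length s 0 le_rfl

theorem findgo_char (c : Char) : ∀ (pre suf : List Char) (k : Nat), c ∉ pre →
    PySem.Chars.find.go [c] (pre ++ c :: suf) k = (k : Int) + pre.length := by
  intro pre
  induction pre with
  | nil =>
    intro suf k _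
    have hp : [c].isPrefixOf (c :: suf) = true := by simp [List.isPrefixOf]
    simp [PySem.Chars.find.go, hp]
  | cons x t ih =>
    intro suf k hmem
    have hx : x ≠ c := fun h => hmem (by simp [h])
    have hp : [c].isPrefixOf (x :: (t ++ c :: suf)) = false := by
      simp [List.isPrefixOf]; exact fun h => absurd h.symm hx
    simp only [List.cons_append, PySem.Chars.find.go, hp, Bool.false_eq_true, if_false]
    rw [ih suf (k+1) (fun h => hmem (List.mem_cons_of_mem x h))]
    simp only [List.length_cons]
    push_cast; ring

theorem lastIdx?_append (c : Char) (a b : List Char) :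
    lastIdx? c (a ++ b) =
      match lastIdx? c b with
      | some k => some (a.length + k)
      | none => lastIdx? c a := by
  induction a with
  | nil => cases h : lastIdx? c b <;> simp [lastIdx?, h]
  | cons x t ih =>
    cases h : lastIdx? c b with
    | some k => simp [lastIdx?, ih, h]; omega
    | none => simp [lastIdx?, ih, h]

theorem lastIdx?_eq_none_iff (c : Char) (l : List Char) :
    lastIdx? c l = none ↔ c ∉ l := by
  induction l with
  | nil => simp [lastIdx?]
  | cons x t ih =>
    cases h : lastIdx? c t with
    | some k =>
      have hct : c ∈ t := by
        by_contra hc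
        rw [← ih] at hc
        rw [h] at hc; simp at hc
      simp only [lastIdx?, h]
      simp [List.mem_cons_of_mem x hct]
    | none =>
      simp only [lastIdx?, h]
      by_cases hx : x = c
      · simp [hx]
      · simp [hx, ih.mp h]; exact fun h' => absurd h'.symm hx

theorem lastIdx?_lt_length (c : Char) : ∀ (l : List Char) (k : Nat),
    lastIdx? c l = some k → k < l.length := by
  intro l
  induction l with
  | nil => intro k h; simp [lastIdx?] at h
  | cons x t ih =>
    intro k h
    simp only [lastIdx?] at h
    cases ht : lastIdx? c t with
    | some m => rw [ht] at h; simp at h; have := ih m ht; simp; omega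
    | none => rw [ht] at h; by_cases hx : x = c <;> simp [hx] at h <;> simp [← h]

theorem rfindgo_char (s : List Char) (c : Char) : ∀ (j : Nat),
    PySem.Chars.rfind.go s [c] j =
      match lastIdx? c (s.take (j+1)) with
      | some k => (k : Int)
      | none => -1 := by
  intro j
  induction j with
  | zero =>
    rw [PySem.Chars.rfind.go]
    cases s with
    | nil => simp [List.isPrefixOf, lastIdx?]
    | cons x t =>
      by_cases hx : x = c
      · subst hx; simp [List.isPrefixOf, lastIdx?]
      · have hp : [c].isPrefixOf (x :: t) = false := by
          rw [Bool.eq_false_iff]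
          intro h
          rw [isPrefixOf_singleton] at h
          simp at h
          exact hx h
        simp [hp, lastIdx?, hx]
  | succ j ih =>
    rw [PySem.Chars.rfind.go]
    by_cases hj : j + 1 < s.length
    · have htake : s.take (j+2) = s.take (j+1) ++ [s[j+1]] := by
        rw [List.take_add_one]; simp [List.getElem?_eq_getElem hj]
      by_cases hc : s[j+1] = c
      · have hp : [c].isPrefixOf (s.drop (j+1)) = true := by
          rw [isPrefixOf_singleton]
          rw [List.head?_drop]
          simp [List.getElem?_eq_getElem hj, hc]
        rw [htake, lastIdx?_append]
        simp only [lastIdx?, hc, if_pos rfl]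
        simp [hp]
        omega
      · have hp : [c].isPrefixOf (s.drop (j+1)) = false := by
          rw [Bool.eq_false_iff]
          intro h
          rw [isPrefixOf_singleton] at h
          rw [List.head?_drop] at h
          simp [List.getElem?_eq_getElem hj] at h
          exact hc h
        rw [htake, lastIdx?_append]
        simp [hp, lastIdx?, hc, ih]
    · have hdrop : s.drop (j+1) = [] := List.drop_eq_nil_of_le (by omega)
      have htake : s.take (j+2) = s.take (j+1) := by
        rw [List.take_of_length_le (by omega), List.take_of_length_le (by omega)]
      have hp : [c].isPrefixOf (s.drop (j+1)) = false := by simp [hdrop, List.isPrefixOf]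
      simp [hp, htake, ih]

theorem rfind_char (s : List Char) (c : Char) :
    PySem.Chars.rfind s [c] =
      match lastIdx? c s with
      | some k => (k : Int)
      | none => -1 := by
  rw [PySem.Chars.rfind, rfindgo_char]
  rw [List.take_of_length_le (by omega)]

theorem afterVal_eq (n : Nat) : ∀ (l : List Char) (i : Nat) (af : Bool),
    afterVal n l i af =
      match lastIdx? '.' l with
      | some k => decide (((i + k : Nat) : Int) < (n : Int) - 1)
      | none => af := by
  intro l
  induction l with
  | nil => intro i af; simp [afterVal, lastIdx?]
  | cons x t ih =>
    intro i af
    simp only [afterVal, ih]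
    cases ht : lastIdx? '.' t with
    | some k =>
      simp only [lastIdx?, ht]
      congr 1; push_cast; ring_nf
    | none =>
      simp only [lastIdx?, ht]
      by_cases hx : x = '.'
      · simp [hx]
      · simp [hx]

theorem loop_no_at (n : Nat) : ∀ (l : List Char) (i : Nat) (p b af : Bool), '@' ∉ l →
    gmailLoop n l i false p b af = false := by
  intro l
  induction l with
  | nil => intro i p b af _; simp [gmailLoop]
  | cons x t ih =>
    intro i p b af hmem
    have hx : ¬ x = '@' := fun h => hmem (by simp [h])
    have ht : '@' ∉ t := fun h => hmem (List.mem_cons_of_mem x h)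
    by_cases hd : x = '.' <;> simp [gmailLoop, hx, hd, ih _ _ _ _ ht]

theorem loop_pre (n : Nat) : ∀ (pre rest : List Char) (i : Nat) (p b : Bool), '@' ∉ pre →
    gmailLoop n (pre ++ rest) i false p b false =
      gmailLoop n rest (i + pre.length) false p b false := by
  intro pre
  induction pre with
  | nil => intro rest i p b _; simp
  | cons x t ih =>
    intro rest i p b hmem
    have hx : ¬ x = '@' := fun h => hmem (by simp [h])
    have ht : '@' ∉ t := fun h => hmem (List.mem_cons_of_mem x h)
    by_cases hd : x = '.' <;>
      simp [gmailLoop, hx, hd, ih rest (i+1) _ _ ht] <;>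
      ring_nf

theorem loop_second_at (n : Nat) : ∀ (l : List Char) (i : Nat) (p b af : Bool), '@' ∈ l →
    gmailLoop n l i true p b af = false := by
  intro l
  induction l with
  | nil => intro i p b af h; simp at h
  | cons x t ih =>
    intro i p b af hmem
    by_cases hx : x = '@'
    · simp [gmailLoop, hx]
    · have ht : '@' ∈ t := by
        cases List.mem_cons.mp hmem with
        | inl h => exact absurd h.symm hx
        | inr h => exact h
      by_cases hd : x = '.' <;> simp [gmailLoop, hx, hd, ih _ _ _ _ ht]

theorem loop_after (n : Nat) : ∀ (l : List Char) (i : Nat) (p b af : Bool), '@' ∉ l →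
    gmailLoop n l i true p b af =
      ((p || decide ('.' ∈ l)) && b && afterVal n l i af) := by
  intro l
  induction l with
  | nil => intro i p b af _; simp [gmailLoop, afterVal, Bool.and_comm, Bool.and_assoc, Bool.and_left_comm]
  | cons x t ih =>
    intro i p b af hmem
    have hx : ¬ x = '@' := fun h => hmem (by simp [h])
    have ht : '@' ∉ t := fun h => hmem (List.mem_cons_of_mem x h)
    by_cases hd : x = '.'
    · simp [gmailLoop, hx, hd, ih _ _ _ _ ht, afterVal]
    · have hd' : ¬ ('.' = x) := fun h => hd h.symm
      simp [gmailLoop, hx, hd, hd', ih _ _ _ _ ht, afterVal]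

theorem exists_split (c : Char) : ∀ (l : List Char), c ∈ l →
    ∃ pre suf, l = pre ++ c :: suf ∧ c ∉ pre := by
  intro l
  induction l with
  | nil => intro h; simp at h
  | cons x t ih =>
    intro hmem
    by_cases hx : x = c
    · exact ⟨[], t, by simp [hx], by simp⟩
    · have ht : c ∈ t := by
        cases List.mem_cons.mp hmem with
        | inl h => exact absurd h.symm hx
        | inr h => exact h
      obtain ⟨pre, suf, heq, hpre⟩ := ih ht
      exact ⟨x :: pre, suf, by simp [heq], by
        intro h
        cases List.mem_cons.mp h with
        | inl h' => exact hx h'.symm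
        | inr h' => exact hpre h'⟩

-- ===== VERDICT (by name: the statement is the Claim_ definition above) =====
theorem gmail_spec : Claim_equal_gmail := by
  intro email _
  unfold Spec_gmail gmail gmail_alt
  have hat : ("@" : String).toList = ['@'] := rfl
  have hdot : (("." : String)).toList = ['.'] := rfl
  simp only [PySem.Str.count_eq, PySem.Str.find_eq, PySem.Str.rfind_eq, PySem.Str.len_eq,
    PySem.Chars.len_eq, hat, hdot, count_char, rfind_char]
  generalize email.toList = l
  by_cases h1 : List.count '@' l = 1
  case neg =>
    rw [if_pos (by simpa using h1)]
    by_cases h0 : List.count '@' l = 0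
    · exact loop_no_at _ _ _ _ _ _ (by simpa [List.count_eq_zero] using h0)
    · have hmem : '@' ∈ l := by rw [← List.count_pos_iff]; omega
      obtain ⟨pre, suf, heq, hpre⟩ := exists_split '@' l hmem
      subst heq
      have hcnt : List.count '@' (pre ++ '@' :: suf) = List.count '@' suf + 1 := by
        simp [List.count_append, List.count_eq_zero.mpr hpre]
      have hsuf : '@' ∈ suf := by
        rw [← List.count_pos_iff]; omega
      rw [loop_pre _ _ _ _ _ _ hpre]
      have step : ∀ j, gmailLoop (pre ++ '@' :: suf).length ('@' :: suf) j false false false false =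
          gmailLoop (pre ++ '@' :: suf).length suf (j+1) true false (decide (0 < j)) false := by
        intro j; simp [gmailLoop]
      rw [step]
      exact loop_second_at _ _ _ _ _ _ hsuf
  case pos =>
    rw [if_neg (by simpa using h1)]
    have hmem : '@' ∈ l := by rw [← List.count_pos_iff]; omega
    obtain ⟨pre, suf, heq, hpre⟩ := exists_split '@' l hmem
    subst heq
    have hcnt : List.count '@' (pre ++ '@' :: suf) = List.count '@' suf + 1 := by
      simp [List.count_append, List.count_eq_zero.mpr hpre]
    have hsuf : '@' ∉ suf := List.count_eq_zero.mp (by omega)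
    have hfind : PySem.Chars.find (pre ++ '@' :: suf) ['@'] = (pre.length : Int) := by
      rw [PySem.Chars.find]
      simpa using findgo_char '@' pre suf 0 hpre
    rw [hfind]
    rw [loop_pre _ _ _ _ _ _ hpre]
    have step : ∀ j, gmailLoop (pre ++ '@' :: suf).length ('@' :: suf) j false false false false =
        gmailLoop (pre ++ '@' :: suf).length suf (j+1) true false (decide (0 < j)) false := by
      intro j; simp [gmailLoop]
    rw [step]
    rw [loop_after _ _ _ _ _ _ hsuf, afterVal_eq]
    rw [lastIdx?_append]
    have hlen : (pre ++ '@' :: suf).length = pre.length + 1 + suf.length := by simp; omega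
    cases hs : lastIdx? '.' suf with
    | some k =>
      have hmemdot : '.' ∈ suf := by
        by_contra h
        rw [← lastIdx?_eq_none_iff] at h
        rw [h] at hs; simp at hs
      have hcons : lastIdx? '.' ('@' :: suf) = some (k + 1) := by
        simp [lastIdx?, hs]
      rw [hcons]
      simp only [hs, hmemdot, decide_true, Bool.or_true, Bool.false_or]
      have e1 : decide (0 < 0 + pre.length) = decide ((0:Int) < (pre.length : Int)) := by
        rw [decide_eq_decide]; omega
      have e2 : decide ((pre.length : Int) < ((pre.length + (k + 1) : Nat) : Int)) = true := by
        apply decide_eq_true; push_cast; omega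
      have e3 : (((0 + pre.length + 1 + k : Nat) : Int)) = (((pre.length + (k + 1) : Nat) : Int)) := by
        push_cast; ring
      rw [e1, e2, e3]
      cases hb : decide ((0:Int) < (pre.length : Int)) <;> simp
    | none =>
      have hnodot : '.' ∉ suf := (lastIdx?_eq_none_iff _ _).mp hs
      have hcons : lastIdx? '.' ('@' :: suf) = none := by
        simp [lastIdx?, hs]
      rw [hcons]
      simp only [hnodot, decide_false, Bool.or_false, Bool.false_or, Bool.false_and]
      cases hp : lastIdx? '.' pre with
      | some k =>
        have hk : k < pre.length := lastIdx?_lt_length '.' pre k hp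
        have : decide ((pre.length : Int) < (k : Int)) = false := by
          apply decide_eq_false; push_cast; omega
        simp [this] <;> omega
      | none =>
        have : decide ((pre.length : Int) < (-1 : Int)) = false := by
          apply decide_eq_false; omega
        simp [this] <;> omega
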